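-- pv_equiv track=rewrite | github.com/syed-maisam/CCPS109 | labs109.py | front_back_sort
-- ===== SOURCE A (Python) =====
-- def front_back_sort(perm):
--     if len(perm) <= 1:
--         return 0
--
--     n = len(perm)
--     pos = [0] * n
--
--     for i, val in enumerate(perm):
--         pos[val] = i
--
--     max_length = 1
--     current_length = 1
--
--     for i in range(1, n):
--         if pos[i] > pos[i-1]:
--             current_length += 1
--             max_length = max(max_length, current_length)
--         else:
--             current_length = 1
--
--     return n - max_length
-- ===== SOURCE B (Python) =====
-- def front_back_sort(perm):
--     if len(perm) <= 1:
--         return 0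
--     n = len(perm)
--     pos = [0] * n
--     for i, val in enumerate(perm):
--         pos[val] = i
--     # positions where the increasing streak of pos breaks; the answer is n minus
--     # the largest distance between two consecutive breaks (with sentinels 0 and n)
--     breaks = [i for i in range(1, n) if pos[i] <= pos[i - 1]]
--     max_length = max(b - a for a, b in zip([0] + breaks, breaks + [n]))
--     return n - max_length
-- ===== Notes on version B (the rewrite author's own statement) =====
-- stated objective: alternative
-- what changed: B keeps the position array but replaces A's stateful longest-streak scan (current/max run-length counters) by collecting the list of streak-break positions and returning n minus the largest gap between consecutive breaks (with sentinels 0 and n).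
import Mathlib
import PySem

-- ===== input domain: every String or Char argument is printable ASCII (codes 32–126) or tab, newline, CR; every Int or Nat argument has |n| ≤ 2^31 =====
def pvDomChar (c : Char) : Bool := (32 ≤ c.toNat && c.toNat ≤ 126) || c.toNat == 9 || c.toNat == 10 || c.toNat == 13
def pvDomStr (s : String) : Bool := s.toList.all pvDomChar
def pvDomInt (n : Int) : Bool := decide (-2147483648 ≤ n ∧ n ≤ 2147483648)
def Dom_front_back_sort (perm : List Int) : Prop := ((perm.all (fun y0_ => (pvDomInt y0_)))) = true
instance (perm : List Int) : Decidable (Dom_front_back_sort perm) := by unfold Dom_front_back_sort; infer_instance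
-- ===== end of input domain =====

-- B keeps the position array but replaces A's stateful longest-streak scan by collecting
-- the streak-break positions and returning n minus the largest gap between consecutive breaks.

-- ===== PORT A =====
-- pos[val] = i  for (i, val) in enumerate(perm)   (shared by both versions' first loop)
def fbsPos (perm : List Int) : List Int :=
  (PySem.List.enumerate perm 0).foldl
    (fun pos iv => PySem.List.pySetD pos iv.2 iv.1)
    (List.replicate perm.length 0)

-- body of A's second loop, state = (max_length, current_length)
def fbsStep (pos : List Int) (st : Int × Int) (i : Int) : Int × Int :=
  if PySem.List.pyGetD pos i 0 > PySem.List.pyGetD pos (i - 1) 0 then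
    (max st.1 (st.2 + 1), st.2 + 1)
  else (st.1, 1)

def front_back_sort (perm : List Int) : Int :=
  if perm.length ≤ 1 then 0
  else
    (perm.length : Int) -
      ((PySem.List.pyRange 1 (perm.length : Int) 1).foldl (fbsStep (fbsPos perm)) (1, 1)).1

-- ===== PORT B =====
-- breaks = [i for i in range(1, n) if pos[i] <= pos[i - 1]]
def fbsAltBreaks (pos : List Int) (n : Int) : List Int :=
  (PySem.List.pyRange 1 n 1).filter
    (fun i => decide (PySem.List.pyGetD pos i 0 ≤ PySem.List.pyGetD pos (i - 1) 0))

def front_back_sort_alt (perm : List Int) : Int :=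
  if perm.length ≤ 1 then 0
  else
    -- max(b - a for a, b in zip([0] + breaks, breaks + [n])); the zip list is
    -- nonempty, so Python's max never raises and the .getD default is unreachable
    (perm.length : Int) -
      (PySem.List.max?
        ((List.zip ((0 : Int) :: fbsAltBreaks (fbsPos perm) (perm.length : Int))
            (fbsAltBreaks (fbsPos perm) (perm.length : Int) ++ [(perm.length : Int)])).map
          (fun ab => ab.2 - ab.1)) (fun g => g)).getD 0

-- ===== PRECONDITION & SPEC =====
-- Pre_ excludes exactly the inputs on which A raises IndexError: a list of length n ≥ 2
-- containing a value outside [-n, n).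
def Pre_front_back_sort (perm : List Int) : Prop :=
  perm.length ≤ 1 ∨
    ∀ v ∈ perm, -(perm.length : Int) ≤ v ∧ v < (perm.length : Int)
instance (perm : List Int) : Decidable (Pre_front_back_sort perm) := by
  unfold Pre_front_back_sort; infer_instance

def pvWitness_front_back_sort : List Int := [2, 0, 1]

def Spec_front_back_sort (perm : List Int) (out : Int) : Prop := out = front_back_sort_alt perm
instance (perm : List Int) (out : Int) : Decidable (Spec_front_back_sort perm out) := by
  unfold Spec_front_back_sort; infer_instance

-- ===== CLAIM (what is proved, stated in full; the proofs are below) =====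
def Claim_equal_front_back_sort : Prop :=
  ∀ (perm : List Int), Dom_front_back_sort perm → Pre_front_back_sort perm →
    Spec_front_back_sort perm (front_back_sort perm)

-- ===== LEMMAS AND PROOFS =====

-- streak predicate at index i (i ≥ 1): pos[i] > pos[i-1]
def pvP (pos : List Int) (i : Nat) : Bool :=
  decide (PySem.List.pyGetD pos (i : Int) 0 > PySem.List.pyGetD pos ((i : Int) - 1) 0)

-- current streak length ending at index m
def pvC (pos : List Int) : Nat → Int
  | 0 => 1
  | m + 1 => if pvP pos (m + 1) then pvC pos m + 1 else 1

-- max streak length over indices 0..m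
def pvMx (pos : List Int) : Nat → Int
  | 0 => 1
  | m + 1 => max (pvMx pos m) (pvC pos (m + 1))

lemma pvC_pos (pos : List Int) (m : Nat) : 1 ≤ pvC pos m := by
  induction m with
  | zero => simp [pvC]
  | succ m ih => simp only [pvC]; split <;> omega

lemma pvMx_pos (pos : List Int) (m : Nat) : 1 ≤ pvMx pos m := by
  induction m with
  | zero => simp [pvMx]
  | succ m ih => simp only [pvMx]; omega

-- the gap list [b - a for a, b in zip(e :: bs, bs ++ [m])], structurally
def pvGapsFrom (e : Int) (bs : List Int) (m : Int) : List Int :=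
  match bs with
  | [] => [m - e]
  | b :: t => (b - e) :: pvGapsFrom b t m

def pvInitGaps (e : Int) (bs : List Int) : List Int :=
  match bs with
  | [] => []
  | b :: t => (b - e) :: pvInitGaps b t

def pvLastEdge (e : Int) (bs : List Int) : Int :=
  match bs with
  | [] => e
  | b :: t => pvLastEdge b t

lemma pv_zip_gaps (bs : List Int) : ∀ (e m : Int),
    (List.zip (e :: bs) (bs ++ [m])).map (fun ab => ab.2 - ab.1) = pvGapsFrom e bs m := by
  induction bs with
  | nil => intro e m; simp [pvGapsFrom]
  | cons b t ih => intro e m; simp [pvGapsFrom, ih b m]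

lemma pv_gaps_decomp (bs : List Int) : ∀ (e m : Int),
    pvGapsFrom e bs m = pvInitGaps e bs ++ [m - pvLastEdge e bs] := by
  induction bs with
  | nil => intro e m; simp [pvGapsFrom, pvInitGaps, pvLastEdge]
  | cons b t ih => intro e m; simp [pvGapsFrom, pvInitGaps, pvLastEdge, ih b m]

lemma pv_initGaps_append (bs : List Int) : ∀ (e b : Int),
    pvInitGaps e (bs ++ [b]) = pvInitGaps e bs ++ [b - pvLastEdge e bs] := by
  induction bs with
  | nil => intro e b; simp [pvInitGaps, pvLastEdge]
  | cons c t ih => intro e b; simp [pvInitGaps, pvLastEdge, ih c b]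

lemma pv_lastEdge_append (bs : List Int) : ∀ (e b : Int),
    pvLastEdge e (bs ++ [b]) = b := by
  induction bs with
  | nil => intro e b; simp [pvLastEdge]
  | cons c t ih => intro e b; simp [pvLastEdge, ih c b]

-- A's scan over range(1, m) lands in state (max streak ≤ m-1, streak ending at m-1)
lemma pv_Ascan (pos : List Int) : ∀ m : Nat, 1 ≤ m →
    ((PySem.List.pyRange 1 (m : Int) 1).foldl (fbsStep pos) (1, 1))
      = (pvMx pos (m - 1), pvC pos (m - 1)) := by
  intro m
  induction m with
  | zero => omega
  | succ m ih =>
    intro _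
    by_cases hm : 1 ≤ m
    · have hcast : ((m + 1 : Nat) : Int) = (m : Int) + 1 := by push_cast; ring
      rw [hcast, PySem.List.pyRange_one_succ_right (by omega), List.foldl_append, ih hm]
      simp only [List.foldl_cons, List.foldl_nil, fbsStep, Nat.add_sub_cancel]
      have hmrw : m = (m - 1) + 1 := by omega
      by_cases h : PySem.List.pyGetD pos (m : Int) 0 > PySem.List.pyGetD pos ((m : Int) - 1) 0
      · rw [if_pos h]
        have hP : pvP pos m = true := by rw [pvP]; exact decide_eq_true h
        have hC : pvC pos m = pvC pos (m - 1) + 1 := by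
          conv_lhs => rw [hmrw]
          rw [pvC, if_pos (by rw [← hmrw]; exact hP)]
        have hM : pvMx pos m = max (pvMx pos (m - 1)) (pvC pos m) := by
          conv_lhs => rw [hmrw]
          rw [pvMx, ← hmrw]
        rw [hM, hC]
      · rw [if_neg h]
        have hP : pvP pos m = false := by rw [pvP]; exact decide_eq_false h
        have hC : pvC pos m = 1 := by
          conv_lhs => rw [hmrw]
          rw [pvC, if_neg (by rw [← hmrw]; simp [hP])]
        have hM : pvMx pos m = max (pvMx pos (m - 1)) (pvC pos m) := by
          conv_lhs => rw [hmrw]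
          rw [pvMx, ← hmrw]
        have := pvMx_pos pos (m - 1)
        rw [hM, hC]
        rw [max_eq_left (by omega)]
    · have hm0 : m = 0 := by omega
      subst hm0
      rw [show ((1 : Nat) : Int) = 1 by norm_num, PySem.List.pyRange_one_eq_nil le_rfl]
      simp [pvMx, pvC]

-- invariant of B's break list over range(1, m)
lemma pv_Binv (pos : List Int) : ∀ m : Nat, 1 ≤ m →
    ((m : Int) - pvLastEdge 0 (fbsAltBreaks pos (m : Int)) = pvC pos (m - 1)) ∧
    (max ((pvInitGaps 0 (fbsAltBreaks pos (m : Int))).foldl max 1) (pvC pos (m - 1))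
      = pvMx pos (m - 1)) := by
  intro m
  induction m with
  | zero => omega
  | succ m ih =>
    intro _
    by_cases hm : 1 ≤ m
    · rcases ih hm with ⟨ih1, ih2⟩
      have hcast : ((m + 1 : Nat) : Int) = (m : Int) + 1 := by push_cast; ring
      have hsplit : fbsAltBreaks pos ((m + 1 : Nat) : Int)
          = fbsAltBreaks pos (m : Int) ++
            (if PySem.List.pyGetD pos (m : Int) 0 ≤ PySem.List.pyGetD pos ((m : Int) - 1) 0
              then [(m : Int)] else []) := by
        rw [fbsAltBreaks, hcast, PySem.List.pyRange_one_succ_right (by omega),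
          List.filter_append]
        rw [fbsAltBreaks]
        congr 1
        simp [List.filter]
        split <;> simp_all
      have hmrw : m = (m - 1) + 1 := by omega
      have hC : pvC pos m = if pvP pos m then pvC pos (m - 1) + 1 else 1 := by
        conv_lhs => rw [hmrw]
        rw [pvC, ← hmrw]
      have hM : pvMx pos m = max (pvMx pos (m - 1)) (pvC pos m) := by
        conv_lhs => rw [hmrw]
        rw [pvMx, ← hmrw]
      simp only [Nat.add_sub_cancel]
      by_cases h : PySem.List.pyGetD pos (m : Int) 0 ≤ PySem.List.pyGetD pos ((m : Int) - 1) 0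
      · -- a break at m: the streak restarts
        have hP : pvP pos m = false := by rw [pvP]; exact decide_eq_false (by omega)
        have hC1 : pvC pos m = 1 := by rw [hC, hP]; simp
        rw [hsplit, if_pos h, pv_lastEdge_append, pv_initGaps_append, List.foldl_append]
        simp only [List.foldl_cons, List.foldl_nil]
        have h3 := pvC_pos pos (m - 1)
        exact ⟨by omega, by omega⟩
      · -- no break: the last gap grows by one
        have hP : pvP pos m = true := by rw [pvP]; exact decide_eq_true (by omega)
        have hC1 : pvC pos m = pvC pos (m - 1) + 1 := by rw [hC, hP]; simp
        rw [hsplit, if_neg h, List.append_nil]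
        exact ⟨by omega, by omega⟩
    · have hm0 : m = 0 := by omega
      subst hm0
      have hnil : fbsAltBreaks pos ((1 : Nat) : Int) = [] := by
        rw [fbsAltBreaks, show ((1 : Nat) : Int) = 1 by norm_num,
          PySem.List.pyRange_one_eq_nil le_rfl]
        rfl
      rw [hnil]
      simp [pvInitGaps, pvLastEdge, pvC, pvMx]

-- every break is ≥ 1
lemma pv_breaks_ge_one (pos : List Int) (n : Int) :
    ∀ b ∈ fbsAltBreaks pos n, 1 ≤ b := by
  intro b hb
  rw [fbsAltBreaks, List.mem_filter] at hb
  exact (PySem.List.mem_pyRange_one.mp hb.1).1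

-- Python's max over the gap list, expressed through the decomposition
lemma pv_max_gaps (pos : List Int) (m : Int) (hm : 1 ≤ m)
    (hge : ∀ b ∈ fbsAltBreaks pos m, 1 ≤ b) :
    PySem.List.max? (pvGapsFrom 0 (fbsAltBreaks pos m) m) (fun g => g)
      = some (max ((pvInitGaps 0 (fbsAltBreaks pos m)).foldl max 1)
          (m - pvLastEdge 0 (fbsAltBreaks pos m))) := by
  cases hbs : fbsAltBreaks pos m with
  | nil =>
    rw [pvGapsFrom, PySem.List.max?_id_cons]
    simp [pvInitGaps, pvLastEdge]
    omega
  | cons b t =>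
    have hb1 : 1 ≤ b := hge b (by rw [hbs]; exact List.mem_cons_self)
    rw [pvGapsFrom, PySem.List.max?_id_cons]
    have hdec : pvInitGaps 0 (b :: t) ++ [m - pvLastEdge 0 (b :: t)]
        = pvGapsFrom 0 (b :: t) m := (pv_gaps_decomp (b :: t) 0 m).symm
    congr 1
    have : max ((pvInitGaps 0 (b :: t)).foldl max 1) (m - pvLastEdge 0 (b :: t))
        = (pvInitGaps 0 (b :: t) ++ [m - pvLastEdge 0 (b :: t)]).foldl max 1 := by
      rw [List.foldl_append]; simp
    rw [this, hdec, pvGapsFrom]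
    simp only [List.foldl_cons]
    rw [show max (1 : Int) (b - 0) = b - 0 by omega]

lemma pv_A_eq (perm : List Int) (h2 : 2 ≤ perm.length) :
    front_back_sort perm = (perm.length : Int) - pvMx (fbsPos perm) (perm.length - 1) := by
  rw [front_back_sort, if_neg (by omega), pv_Ascan (fbsPos perm) perm.length (by omega)]

lemma pv_B_eq (perm : List Int) (h2 : 2 ≤ perm.length) :
    front_back_sort_alt perm = (perm.length : Int) - pvMx (fbsPos perm) (perm.length - 1) := by
  rw [front_back_sort_alt, if_neg (by omega)]
  rw [pv_zip_gaps]
  rw [pv_max_gaps (fbsPos perm) (perm.length : Int) (by omega)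
    (pv_breaks_ge_one (fbsPos perm) (perm.length : Int))]
  rcases pv_Binv (fbsPos perm) perm.length (by omega) with ⟨h1, hmax⟩
  rw [Option.getD_some, h1, hmax]

-- ===== VERDICT (by name: the statement is the Claim_ definition above) =====
theorem front_back_sort_spec : Claim_equal_front_back_sort := by
  intro perm _ _
  unfold Spec_front_back_sort
  by_cases hlen : perm.length ≤ 1
  · rw [front_back_sort, if_pos hlen, front_back_sort_alt, if_pos hlen]
  · rw [pv_A_eq perm (by omega), pv_B_eq perm (by omega)]
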